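-- pv_equiv track=rewrite | github.com/OxQuasar/nous-memories | iching/i-summary/work/c1c2_nuclear_rank.py | mat_vec_f2
-- ===== SOURCE A (Python) =====
-- def mat_vec_f2(A, v, n):
--     result = 0
--     for i in range(n):
--         s = 0
--         for j in range(n):
--             s ^= A[i][j] & ((v >> j) & 1)
--         result |= (s << i)
--     return result
-- ===== SOURCE B (Python) =====
-- def mat_vec_f2(A, v, n):
--     m = max(n, 0)
--     out = 0
--     for i, row in enumerate(A[:m]):
--         mask = sum((x & 1) << j for j, x in enumerate(row[:m]))
--         out += (bin(mask & v).count("1") & 1) << i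
--     return out
-- ===== Notes on version B (the rewrite author's own statement) =====
-- stated objective: alternative
-- what changed: B replaces A's index-driven per-bit XOR loops with a single pass enumerating the sliced rows, packing each row's low bits into an integer mask with enumerate+sum and taking the GF(2) dot product as one popcount parity of mask & v.
import Mathlib
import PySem

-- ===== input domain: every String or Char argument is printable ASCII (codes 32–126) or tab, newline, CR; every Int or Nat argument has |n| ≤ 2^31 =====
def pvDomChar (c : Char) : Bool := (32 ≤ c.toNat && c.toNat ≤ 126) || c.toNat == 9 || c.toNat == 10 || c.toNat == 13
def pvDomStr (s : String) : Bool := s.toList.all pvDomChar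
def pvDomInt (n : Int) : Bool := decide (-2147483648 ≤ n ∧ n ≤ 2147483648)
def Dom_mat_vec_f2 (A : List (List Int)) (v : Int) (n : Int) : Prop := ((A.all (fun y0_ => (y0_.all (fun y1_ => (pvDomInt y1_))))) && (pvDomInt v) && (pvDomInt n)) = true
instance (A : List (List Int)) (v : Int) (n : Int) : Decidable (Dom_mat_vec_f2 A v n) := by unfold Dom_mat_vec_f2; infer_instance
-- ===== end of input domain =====

-- B drops A's index-driven per-bit XOR loops: it enumerates sliced rows, packs each row's low bits
-- into an integer mask and takes the GF(2) dot product as one popcount parity (alternative formulation).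

-- ===== PORT A =====
-- shift counts: Python's `v >> j` / `s << i` with j, i ≥ 0 from range(n) are ported as `>>> j.toNat` / `<<< i.toNat` (exact since j, i ≥ 0)
def mat_vec_f2 (A : List (List Int)) (v : Int) (n : Int) : Int :=
  (PySem.List.pyRange 0 n 1).foldl (fun result i =>
    let row := PySem.List.pyGetD A i []
    let s := (PySem.List.pyRange 0 n 1).foldl
      (fun s j => PySem.Int.bxor s (PySem.Int.band (PySem.List.pyGetD row j 0)
        (PySem.Int.band (v >>> j.toNat) 1))) 0
    PySem.Int.bor result (s <<< i.toNat)) 0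

-- ===== PORT B =====
-- `for i, row in enumerate(A[:m])` / `sum((x & 1) << j for j, x in enumerate(row[:m]))`:
-- enumerate indices are ≥ 0, so `<< i` / `<< j` are ported as `<<< ·.toNat` (exact).
def mat_vec_f2_alt (A : List (List Int)) (v : Int) (n : Int) : Int :=
  let m := max n 0
  (PySem.List.enumerate (PySem.List.slice A none (some m))).foldl (fun out p =>
    let mask := (PySem.List.enumerate (PySem.List.slice p.2 none (some m))).foldl
      (fun acc q => acc + (PySem.Int.band q.2 1) <<< (q.1.toNat : Nat)) 0
    out + (PySem.Int.band ((PySem.Int.bitCount (PySem.Int.band mask v) : Int)) 1) <<< (p.1.toNat : Nat)) 0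

-- ===== PRECONDITION & SPEC =====
-- Pre_ excludes exactly the inputs on which Python A raises IndexError: 0 < n but A has fewer
-- than n rows, or one of the first n rows has fewer than n entries.
def Pre_mat_vec_f2 (A : List (List Int)) (v : Int) (n : Int) : Prop :=
  0 < n → (n ≤ (A.length : Int) ∧ ∀ row ∈ A.take n.toNat, n ≤ (row.length : Int))
instance (A : List (List Int)) (v : Int) (n : Int) : Decidable (Pre_mat_vec_f2 A v n) := by unfold Pre_mat_vec_f2; infer_instance
def pvWitness_mat_vec_f2 : List (List Int) × Int × Int := ([[1, 0], [1, 1]], 3, 2)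
def Spec_mat_vec_f2 (A : List (List Int)) (v : Int) (n : Int) (out : Int) : Prop := out = mat_vec_f2_alt A v n
instance (A : List (List Int)) (v : Int) (n : Int) (out : Int) : Decidable (Spec_mat_vec_f2 A v n out) := by unfold Spec_mat_vec_f2; infer_instance

-- ===== CLAIM (what is proved, stated in full; the proofs are below) =====
def Claim_equal_mat_vec_f2 : Prop := ∀ (A : List (List Int)) (v : Int) (n : Int), Dom_mat_vec_f2 A v n → Pre_mat_vec_f2 A v n → Spec_mat_vec_f2 A v n (mat_vec_f2 A v n)

-- ===== LEMMAS AND PROOFS =====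

-- Nat bit-splitting facts (low-bit peeling of &&& and |||)
theorem pvLandSplit (b m w : Nat) (hb : b ≤ 1) :
    (b + 2 * m) &&& w = b * (w % 2) + 2 * (m &&& w / 2) := by
  apply Nat.eq_of_testBit_eq; intro i
  have hbw : b * (w % 2) ≤ 1 := by interval_cases b <;> omega
  cases i with
  | zero =>
    rw [Nat.testBit_and, Nat.testBit_zero, Nat.testBit_zero, Nat.testBit_zero]
    have h1 : (b + 2 * m) % 2 = b := by omega
    have h2 : (b * (w % 2) + 2 * (m &&& w / 2)) % 2 = b * (w % 2) := by omega
    rw [h1, h2]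
    interval_cases b <;> rcases Nat.mod_two_eq_zero_or_one w with h | h <;> simp [h]
  | succ i =>
    rw [Nat.testBit_and, Nat.testBit_add_one, Nat.testBit_add_one, Nat.testBit_add_one]
    have h1 : (b + 2 * m) / 2 = m := by omega
    have h2 : (b * (w % 2) + 2 * (m &&& w / 2)) / 2 = m &&& w / 2 := by omega
    rw [h1, h2, Nat.testBit_and]

theorem pvLorSplit (b m y : Nat) (hb : b ≤ 1) :
    (b + 2 * m) ||| (2 * y) = b + 2 * (m ||| y) := by
  apply Nat.eq_of_testBit_eq; intro i
  cases i with
  | zero =>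
    rw [Nat.testBit_or, Nat.testBit_zero, Nat.testBit_zero, Nat.testBit_zero]
    have h1 : (b + 2 * m) % 2 = b := by omega
    have h2 : (2 * y) % 2 = 0 := by omega
    have h3 : (b + 2 * (m ||| y)) % 2 = b := by omega
    rw [h1, h2, h3]; simp
  | succ i =>
    rw [Nat.testBit_or, Nat.testBit_add_one, Nat.testBit_add_one, Nat.testBit_add_one]
    have h1 : (b + 2 * m) / 2 = m := by omega
    have h2 : (2 * y) / 2 = y := by omega
    have h3 : (b + 2 * (m ||| y)) / 2 = m ||| y := by omega
    rw [h1, h2, h3, Nat.testBit_or]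

theorem pvLorHigh (i : Nat) : ∀ x : Nat, x < 2 ^ i → x ||| 2 ^ i = x + 2 ^ i := by
  induction i with
  | zero => intro x hx; interval_cases x; decide
  | succ i ih =>
    intro x hx
    have h2 : (2:Nat) ^ (i + 1) = 2 ^ i * 2 := pow_succ 2 i
    calc x ||| 2 ^ (i + 1) = (x % 2 + 2 * (x / 2)) ||| (2 * 2 ^ i) := by
            congr 1 <;> omega
      _ = x % 2 + 2 * (x / 2 ||| 2 ^ i) := pvLorSplit _ _ _ (by omega)
      _ = x % 2 + 2 * (x / 2 + 2 ^ i) := by rw [ih (x / 2) (by omega)]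
      _ = x + 2 ^ (i + 1) := by omega

-- Int low-bit splitting of Python's `&` (PySem.Int.band), valid for every sign of v
theorem pvBandSplit (b m v : Int) (hb : b = 0 ∨ b = 1) (hm : 0 ≤ m) :
    PySem.Int.band (b + 2 * m) v
      = b * PySem.Int.mod v 2 + 2 * PySem.Int.band m (v >>> (1:Nat)) := by
  have hs : v >>> (1:Nat) = v / 2 := by simpa using Int.shiftRight_eq_div_pow v 1
  by_cases hv : 0 ≤ v
  · rw [PySem.Int.band_of_nonneg (by omega) hv,
        PySem.Int.band_of_nonneg hm (by rw [hs]; omega),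
        PySem.Int.mod_eq_emod_of_pos (by norm_num)]
    have e1 : (b + 2 * m).toNat = b.toNat + 2 * m.toNat := by omega
    have e2 : (v >>> (1:Nat)).toNat = v.toNat / 2 := by rw [hs]; omega
    have e3 : v % 2 = ((v.toNat % 2 : Nat) : Int) := by omega
    rw [e1, e2, e3, pvLandSplit b.toNat m.toNat v.toNat (by omega)]
    rcases hb with rfl | rfl <;> push_cast <;> omega
  · have hba : PySem.Int.band (b + 2 * m) v
        = (((b + 2 * m).toNat - ((b + 2 * m).toNat &&& (-v - 1).toNat) : Nat) : Int) := by
      unfold PySem.Int.band; rw [if_pos (by omega), if_neg (by omega)]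
    have hv1 : v >>> (1:Nat) < 0 := by rw [hs]; omega
    have hbm : PySem.Int.band m (v >>> (1:Nat))
        = ((m.toNat - (m.toNat &&& (-(v >>> (1:Nat)) - 1).toNat) : Nat) : Int) := by
      unfold PySem.Int.band; rw [if_pos hm, if_neg (by omega)]
    have key : (-(v >>> (1:Nat)) - 1).toNat = (-v - 1).toNat / 2 := by rw [hs]; omega
    have hmod : PySem.Int.mod v 2 = 1 - (((-v - 1).toNat % 2 : Nat) : Int) := by
      rw [PySem.Int.mod_eq_emod_of_pos (by norm_num)]; omega
    have e1 : (b + 2 * m).toNat = b.toNat + 2 * m.toNat := by omega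
    rw [hba, hbm, key, hmod, e1, pvLandSplit _ _ _ (by omega)]
    have hle1 : m.toNat &&& (-v - 1).toNat / 2 ≤ m.toNat := Nat.and_le_left
    have hle2 : (-v - 1).toNat % 2 ≤ 1 := by omega
    rcases hb with rfl | rfl <;> push_cast <;> omega

-- parity of the popcount of a number split into low bit + rest
theorem pvBitCountLow (c x : Int) (hc : c = 0 ∨ c = 1) (hx : 0 ≤ x) :
    PySem.Int.bitCount (c + 2 * x) % 2 = (c.toNat + PySem.Int.bitCount x) % 2 := by
  by_cases h0 : c + 2 * x = 0
  · have hc0 : c = 0 := by rcases hc with rfl | rfl <;> omega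
    have hx0 : x = 0 := by omega
    subst hc0; subst hx0; simp [PySem.Int.bitCount_zero]
  · have hpos : 0 < c + 2 * x := by rcases hc with rfl | rfl <;> omega
    rw [PySem.Int.bitCount_of_pos hpos, PySem.Int.mod_eq_emod_of_pos (by norm_num),
        PySem.Int.floordiv_eq_ediv_of_pos (by norm_num)]
    have h1 : ((c + 2 * x) % 2).toNat = c.toNat := by rcases hc with rfl | rfl <;> omega
    have h2 : (c + 2 * x) / 2 = x := by rcases hc with rfl | rfl <;> omega
    rw [h1, h2]

-- the GF(2) dot product, recursively over the row (proof-only reformulation of A's inner loop)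
def pvDotA : List Int → Int → Int → Int
  | [], _, s => s
  | r :: rs, v, s => pvDotA rs (v >>> (1:Nat)) (PySem.Int.bxor s (PySem.Int.band r (PySem.Int.band v 1)))

-- the row bitmask, recursively over the row (proof-only reformulation of B's mask)
def pvMk : List Int → Int
  | [] => 0
  | r :: rs => PySem.Int.band r 1 + 2 * pvMk rs

theorem pvBandOne01 (r : Int) : PySem.Int.band r 1 = 0 ∨ PySem.Int.band r 1 = 1 := by
  rw [PySem.Int.band_one]
  have h1 := PySem.Int.mod_nonneg r (b := 2) (by norm_num)
  have h2 := PySem.Int.mod_lt r (b := 2) (by norm_num)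
  omega

theorem pvMk_nonneg (L : List Int) : 0 ≤ pvMk L := by
  induction L with
  | nil => simp [pvMk]
  | cons r rs ih => have := pvBandOne01 r; unfold pvMk; omega

-- the heart: A's xor-accumulation equals the popcount parity of (mask & v)
theorem pvDotEq (L : List Int) : ∀ v s : Int, s = 0 ∨ s = 1 →
    pvDotA L v s = PySem.Int.bxor s ((PySem.Int.bitCount (PySem.Int.band (pvMk L) v) % 2 : Nat) : Int) := by
  induction L with
  | nil =>
    intro v s _
    simp [pvDotA, pvMk, PySem.Int.band_comm 0 v, PySem.Int.band_zero,
      PySem.Int.bitCount_zero, PySem.Int.bxor_zero]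
  | cons r rs ih =>
    intro v s hs
    have hb := pvBandOne01 r
    have hmod : PySem.Int.mod v 2 = 0 ∨ PySem.Int.mod v 2 = 1 := by
      have h1 := PySem.Int.mod_nonneg v (b := 2) (by norm_num)
      have h2 := PySem.Int.mod_lt v (b := 2) (by norm_num)
      omega
    have ht : PySem.Int.band r (PySem.Int.band v 1) = PySem.Int.band r 1 * PySem.Int.mod v 2 := by
      rw [PySem.Int.band_one v]
      rcases hmod with h | h <;> rw [h]
      · rw [PySem.Int.band_zero]; ring
      · rw [mul_one, PySem.Int.band_one]
    have hc : PySem.Int.band r (PySem.Int.band v 1) = 0 ∨ PySem.Int.band r (PySem.Int.band v 1) = 1 := by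
      rw [ht]; rcases hb with h | h <;> rcases hmod with h' | h' <;> rw [h, h'] <;> norm_num
    have hP : 0 ≤ PySem.Int.band (pvMk rs) (v >>> (1:Nat)) :=
      PySem.Int.band_nonneg_of_nonneg_left _ (pvMk_nonneg rs)
    have hsplit : PySem.Int.band (pvMk (r :: rs)) v
        = PySem.Int.band r (PySem.Int.band v 1) + 2 * PySem.Int.band (pvMk rs) (v >>> (1:Nat)) := by
      rw [show pvMk (r :: rs) = PySem.Int.band r 1 + 2 * pvMk rs from rfl, ht]
      exact pvBandSplit _ _ v hb (pvMk_nonneg rs)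
    have hs' : PySem.Int.bxor s (PySem.Int.band r (PySem.Int.band v 1)) = 0
        ∨ PySem.Int.bxor s (PySem.Int.band r (PySem.Int.band v 1)) = 1 := by
      rcases hs with rfl | rfl <;> rcases hc with h | h <;> rw [h] <;> decide
    have hstep : pvDotA (r :: rs) v s
        = pvDotA rs (v >>> (1:Nat)) (PySem.Int.bxor s (PySem.Int.band r (PySem.Int.band v 1))) := rfl
    rw [hstep, ih _ _ hs', hsplit, pvBitCountLow _ _ hc hP]
    rcases Nat.mod_two_eq_zero_or_one
        (PySem.Int.bitCount (PySem.Int.band (pvMk rs) (v >>> (1:Nat)))) with hq2 | hq2 <;>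
      rcases hc with h | h <;> rw [h] <;>
      rcases hs with rfl | rfl <;>
      rw [Nat.add_mod, hq2] <;> norm_num <;> decide

-- A's inner index loop equals pvDotA on the row prefix
theorem pvInnerA (row : List Int) (nN : Nat) (hrow : nN ≤ row.length) :
    ∀ (k aN : Nat), nN = aN + k → ∀ (v s : Int),
    (PySem.List.pyRange (aN : Int) (nN : Int) 1).foldl
      (fun s j => PySem.Int.bxor s (PySem.Int.band (PySem.List.pyGetD row j 0)
        (PySem.Int.band (v >>> j.toNat) 1))) s
    = pvDotA ((row.take nN).drop aN) (v >>> aN) s := by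
  intro k
  induction k with
  | zero =>
    intro aN hk v s
    have h1 : PySem.List.pyRange (aN : Int) (nN : Int) 1 = [] :=
      PySem.List.pyRange_one_eq_nil (by omega)
    have h2 : (row.take nN).drop aN = [] := by
      apply List.drop_of_length_le; simp; omega
    rw [h1, h2]; rfl
  | succ k ih =>
    intro aN hk v s
    have haN : aN < nN := by omega
    have hlt : (aN : Int) < (nN : Int) := by exact_mod_cast haN
    rw [PySem.List.pyRange_one_cons hlt, List.foldl_cons]
    have hlen : aN < (row.take nN).length := by simp; omega
    have hgd : PySem.List.pyGetD row ((aN : Nat) : Int) 0 = row[aN]'(by omega) := by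
      rw [PySem.List.pyGetD_natCast, List.getD_eq_getElem row 0 (by omega)]
    have hdrop : (row.take nN).drop aN = row[aN]'(by omega) :: (row.take nN).drop (aN + 1) := by
      rw [List.drop_eq_getElem_cons hlen, List.getElem_take]
    have hcast : ((aN : Int) + 1) = ((aN + 1 : Nat) : Int) := by push_cast; ring
    have htn : ((aN : Int)).toNat = aN := Int.toNat_natCast aN
    rw [htn, hgd, hcast, ih (aN + 1) (by omega) v _, hdrop, Int.shiftRight_add v aN 1]
    simp only [pvDotA]

-- B's mask loop (already in pyRange/pyGetD form) equals pvMk on the row prefix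
theorem pvInnerB (row : List Int) (nN : Nat) :
    ∀ (k aN : Nat), nN = aN + k → ∀ (acc : Int),
    (PySem.List.pyRange (aN : Int) (nN : Int) 1).foldl
      (fun acc j => acc + (PySem.Int.band (PySem.List.pyGetD row j 0) 1) <<< j.toNat) acc
    = acc + 2 ^ aN * pvMk ((row.take nN).drop aN) := by
  intro k
  induction k with
  | zero =>
    intro aN hk acc
    have h1 : PySem.List.pyRange (aN : Int) (nN : Int) 1 = [] :=
      PySem.List.pyRange_one_eq_nil (by omega)
    have h2 : (row.take nN).drop aN = [] := by
      apply List.drop_of_length_le; simp; omega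
    rw [h1, h2]; simp [pvMk]
  | succ k ih =>
    intro aN hk acc
    have haN : aN < nN := by omega
    have hlt : (aN : Int) < (nN : Int) := by exact_mod_cast haN
    rw [PySem.List.pyRange_one_cons hlt, List.foldl_cons]
    have hcast : ((aN : Int) + 1) = ((aN + 1 : Nat) : Int) := by push_cast; ring
    rw [hcast, ih (aN + 1) (by omega)]
    have htn : ((aN : Int)).toNat = aN := Int.toNat_natCast aN
    rw [htn]
    by_cases hlen : aN < (row.take nN).length
    · rw [List.drop_eq_getElem_cons hlen]
      rw [show pvMk ((row.take nN)[aN] :: (row.take nN).drop (aN + 1))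
            = PySem.Int.band ((row.take nN)[aN]) 1 + 2 * pvMk ((row.take nN).drop (aN + 1)) from rfl]
      have hgd : PySem.List.pyGetD row ((aN : Nat) : Int) 0 = (row.take nN)[aN] := by
        have : aN < row.length := by simp at hlen; omega
        rw [PySem.List.pyGetD_natCast, List.getD_eq_getElem row 0 this, List.getElem_take]
      rw [hgd, Int.shiftLeft_eq, pow_succ]
      ring
    · have h2 : (row.take nN).drop aN = [] := List.drop_of_length_le (by omega)
      have h3 : (row.take nN).drop (aN + 1) = [] := List.drop_of_length_le (by omega)
      have hgd : PySem.List.pyGetD row ((aN : Nat) : Int) 0 = 0 := by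
        rw [PySem.List.pyGetD_natCast]
        apply List.getD_eq_default
        simp at hlen ⊢; omega
      rw [h2, h3, hgd, Int.shiftLeft_eq]
      simp [pvMk]
      decide

-- outer loop: with equal per-row 0/1 bits, OR-ing disjoint bits equals adding them
theorem pvOuter (gA gB : Int → Int) :
    ∀ (k : Nat), (∀ i : Nat, i < k → gA i = gB i ∧ (gB i = 0 ∨ gB i = 1)) →
    (PySem.List.pyRange 0 (k : Int) 1).foldl (fun res i => PySem.Int.bor res (gA i <<< i.toNat)) 0
      = (PySem.List.pyRange 0 (k : Int) 1).foldl (fun res i => res + gB i <<< i.toNat) 0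
    ∧ ∃ m : Nat, (PySem.List.pyRange 0 (k : Int) 1).foldl
        (fun res i => PySem.Int.bor res (gA i <<< i.toNat)) 0 = (m : Int) ∧ m < 2 ^ k := by
  intro k
  induction k with
  | zero =>
    intro _
    constructor
    · rfl
    · exact ⟨0, rfl, by norm_num⟩
  | succ k ih =>
    intro h
    obtain ⟨heq, m, hm, hmlt⟩ := ih (fun i hi => h i (by omega))
    have hsplit : PySem.List.pyRange 0 ((k + 1 : Nat) : Int) 1
        = PySem.List.pyRange 0 (k : Int) 1 ++ [(k : Int)] := by
      have : ((k + 1 : Nat) : Int) = (k : Int) + 1 := by push_cast; ring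
      rw [this, PySem.List.pyRange_one_succ_right (by positivity)]
    obtain ⟨hgab, hg01⟩ := h k (by omega)
    have htn : ((k : Int)).toNat = k := Int.toNat_natCast k
    rw [hsplit, List.foldl_append, List.foldl_append, heq, List.foldl_cons, List.foldl_cons,
        List.foldl_nil, List.foldl_nil, ← heq, hm, hgab, htn]
    have hpow : (2:Nat) ^ (k + 1) = 2 ^ k * 2 := pow_succ 2 k
    rcases hg01 with hg | hg
    · rw [hg, Int.zero_shiftLeft, PySem.Int.bor_zero, add_zero]
      exact ⟨rfl, m, rfl, by omega⟩
    · rw [hg]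
      have h1 : ((1:Int) <<< k) = ((2 ^ k : Nat) : Int) := by
        rw [Int.shiftLeft_eq, one_mul]; push_cast; ring
      rw [h1, PySem.Int.bor_natCast, pvLorHigh k m hmlt]
      exact ⟨by push_cast; ring, m + 2 ^ k, by push_cast; ring, by omega⟩

-- per-row value of A's inner loop as a 0/1 popcount parity of (pvMk prefix & v)
theorem pvRowEq (row : List Int) (v : Int) (nN : Nat) (hrow : nN ≤ row.length) :
    ((PySem.List.pyRange 0 (nN : Int) 1).foldl
      (fun s j => PySem.Int.bxor s (PySem.Int.band (PySem.List.pyGetD row j 0)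
        (PySem.Int.band (v >>> j.toNat) 1))) 0
      = ((PySem.Int.bitCount (PySem.Int.band (pvMk (row.take nN)) v) % 2 : Nat) : Int)) := by
  have h0 : ((0:Nat) : Int) = 0 := rfl
  have hA := pvInnerA row nN hrow nN 0 (by omega) v 0
  rw [h0] at hA
  rw [Int.shiftRight_zero] at hA
  rw [hA]
  have hdot := pvDotEq (row.take nN) (v >>> (0:Nat)) 0 (Or.inl rfl)
  simp only [List.drop_zero] at *
  rw [Int.shiftRight_zero] at hdot
  rw [hdot, PySem.Int.bxor_comm, PySem.Int.bxor_zero]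

-- B's mask for one row (enumerate of the sliced row) equals pvMk of the prefix
theorem pvMaskEq (row : List Int) (nN : Nat) (hrow : nN ≤ row.length) :
    (PySem.List.enumerate (PySem.List.slice row none (some (nN : Int)))).foldl
      (fun acc q => acc + (PySem.Int.band q.2 1) <<< (q.1.toNat : Nat)) 0
    = pvMk (row.take nN) := by
  rw [PySem.List.slice_to_natCast, PySem.List.enumerate_eq_map_pyRange _ 0, List.foldl_map]
  dsimp only
  have hlen : PySem.List.len (row.take nN) = (nN : Int) := by
    unfold PySem.List.len; simp; omega
  rw [hlen]
  have h := pvInnerB (row.take nN) nN nN 0 (by omega) 0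
  rw [show ((0:Nat) : Int) = 0 from rfl] at h
  simp only [List.drop_zero, pow_zero, one_mul, zero_add, List.take_take, min_self] at h
  exact h

-- ===== VERDICT (by name: the statement is the Claim_ definition above) =====
theorem mat_vec_f2_spec : Claim_equal_mat_vec_f2 := by
  unfold Claim_equal_mat_vec_f2
  intro A v n _ hpre
  unfold Spec_mat_vec_f2 mat_vec_f2 mat_vec_f2_alt
  dsimp only
  by_cases hn : n ≤ 0
  · rw [PySem.List.pyRange_one_eq_nil hn,
        show max n 0 = ((0 : Nat) : Int) from by omega, PySem.List.slice_to_natCast,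
        List.take_zero]
    rfl
  · push_neg at hn
    obtain ⟨hlen, hrows⟩ := hpre hn
    set nN : Nat := n.toNat with hnN
    have hcast : (nN : Int) = n := by omega
    rw [← hcast, show max ((nN : Nat) : Int) 0 = ((nN : Nat) : Int) from by omega,
        PySem.List.slice_to_natCast,
        PySem.List.enumerate_eq_map_pyRange (A.take nN) ([] : List Int), List.foldl_map]
    dsimp only
    have hlenA : PySem.List.len (A.take nN) = (nN : Int) := by
      unfold PySem.List.len; simp; omega
    rw [hlenA]
    have h := pvOuter
      (fun i => (PySem.List.pyRange 0 (nN : Int) 1).foldl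
        (fun s j => PySem.Int.bxor s (PySem.Int.band (PySem.List.pyGetD (PySem.List.pyGetD A i []) j 0)
          (PySem.Int.band (v >>> j.toNat) 1))) 0)
      (fun i => PySem.Int.band ((PySem.Int.bitCount (PySem.Int.band
        ((PySem.List.enumerate (PySem.List.slice (PySem.List.pyGetD (A.take nN) i []) none (some ((nN : Nat) : Int)))).foldl
          (fun acc q => acc + (PySem.Int.band q.2 1) <<< (q.1.toNat : Nat)) 0) v) : Int)) 1)
      nN ?_
    · exact h.1
    · intro iN hiN
      beta_reduce
      have hiA : iN < A.length := by omega
      set row : List Int := PySem.List.pyGetD A ((iN : Nat) : Int) [] with hrowdef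
      have hrow : row = A[iN] := by
        rw [hrowdef, PySem.List.pyGetD_natCast, List.getD_eq_getElem A [] hiA]
      have hmem : A[iN] ∈ A.take nN := by
        have : (A.take nN)[iN]'(by simp; omega) = A[iN] := List.getElem_take
        rw [← this]; exact List.getElem_mem _
      have hrlen : nN ≤ row.length := by
        have := hrows _ hmem; rw [hrow]; omega
      have hrowT : PySem.List.pyGetD (A.take nN) ((iN : Nat) : Int) [] = row := by
        rw [PySem.List.pyGetD_natCast, List.getD_eq_getElem (A.take nN) []
          (by simp; omega), List.getElem_take, hrow]
      rw [hrowT, pvMaskEq row nN hrlen]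
      constructor
      · rw [pvRowEq row v nN hrlen, PySem.Int.band_one]
        have : ((2:Int)) = ((2:Nat) : Int) := rfl
        rw [this, PySem.Int.mod_natCast]
      · rw [PySem.Int.band_one]
        have : ((2:Int)) = ((2:Nat) : Int) := rfl
        rw [this, PySem.Int.mod_natCast]
        rcases Nat.mod_two_eq_zero_or_one (PySem.Int.bitCount (PySem.Int.band (pvMk (row.take nN)) v)) with h | h <;>
          rw [h] <;> simp
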